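-- pv_equiv track=rewrite | github.com/bioinf/proteomics2014 | demidovg/1/alignment.py | find_backward_alignment_profiles
-- ===== SOURCE A (Python) =====
-- def find_backward_alignment_profiles(pack_of_seqs1, pack_of_seqs2, backward_matrix):
--     seq_1 = False
--     seq_2 = False
--     if isinstance(pack_of_seqs2, str):
--         pack_of_seqs2 = [pack_of_seqs2]
--     if isinstance(pack_of_seqs1, str):
--         pack_of_seqs1 = [pack_of_seqs1]
--     first_height = len(pack_of_seqs1)
--
--     second_height = len(pack_of_seqs2)
--
--     i = len(pack_of_seqs1[0])
--     j = len(pack_of_seqs2[0])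
--
--     cell = backward_matrix[i][j]
--
--     first_string = ""
--     second_string = ""
--
--
--     while len(cell) > 2:
--         if (cell[2] == "top"):
--             new_i = i - 1
--             new_j = j
--             first_letter = "L"
--             second_letter = "G"
--         elif cell[2] == "left":
--             new_i = i
--             new_j = j - 1
--             first_letter = "G"
--             second_letter = "L"
--         elif cell[2] == "diag":
--             new_i = i - 1
--             new_j = j - 1
--             first_letter = "L"
--             second_letter = "L"
--
--         first_string += first_letter
--         second_string += second_letter
--         cell = backward_matrix[new_i][new_j]
--         i = new_i
--         j = new_j
--
--     new_pack_of_seqs1 = ["" for i in range((first_height))]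
--     new_pack_of_seqs2 = ["" for i in range((second_height))]
--     counter = 0
--
--     for j in range(len(first_string) - 1, -1, -1):
--             if first_string[j] == "G":
--                 for i in range(first_height):
--                     new_pack_of_seqs1[i] += "-"
--             else:
--                 for i in range(first_height):
--                     new_pack_of_seqs1[i] += pack_of_seqs1[i][counter]
--                 counter += 1
--
--     counter = 0
--     for j in range(len(second_string) - 1, -1 , -1):
--             if second_string[j] == "G":
--                 for i in range(second_height):
--                     new_pack_of_seqs2[i] += "-"
--             else:
--                 for i in range(second_height):
--                     new_pack_of_seqs2[i] += pack_of_seqs2[i][counter]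
--                 counter += 1
--     return new_pack_of_seqs1 + new_pack_of_seqs2
-- ===== SOURCE B (Python) =====
-- def find_backward_alignment_profiles(pack_of_seqs1, pack_of_seqs2, backward_matrix):
--     if isinstance(pack_of_seqs2, str):
--         pack_of_seqs2 = [pack_of_seqs2]
--     if isinstance(pack_of_seqs1, str):
--         pack_of_seqs1 = [pack_of_seqs1]
--     i = len(pack_of_seqs1[0])
--     j = len(pack_of_seqs2[0])
--     rows1 = [""] * len(pack_of_seqs1)
--     rows2 = [""] * len(pack_of_seqs2)
--     cell = backward_matrix[i][j]
--     while len(cell) > 2: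
--         d = cell[2]
--         if d == "top":
--             i -= 1
--             rows1 = [s[i] + r for s, r in zip(pack_of_seqs1, rows1)]
--             rows2 = ["-" + r for r in rows2]
--         elif d == "left":
--             j -= 1
--             rows1 = ["-" + r for r in rows1]
--             rows2 = [s[j] + r for s, r in zip(pack_of_seqs2, rows2)]
--         elif d == "diag":
--             i -= 1
--             j -= 1
--             rows1 = [s[i] + r for s, r in zip(pack_of_seqs1, rows1)]
--             rows2 = [s[j] + r for s, r in zip(pack_of_seqs2, rows2)]
--         cell = backward_matrix[i][j]
--     return rows1 + rows2
-- ===== Notes on version B (the rewrite author's own statement) =====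
-- stated objective: simpler
-- what changed: B fuses the backtrace walk with the profile reconstruction: the single backward loop directly prepends either the matrix-indexed letter or '-' to every output row, eliminating A's two G/L marker strings, the shared counter and both forward replay passes.
import Mathlib
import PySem

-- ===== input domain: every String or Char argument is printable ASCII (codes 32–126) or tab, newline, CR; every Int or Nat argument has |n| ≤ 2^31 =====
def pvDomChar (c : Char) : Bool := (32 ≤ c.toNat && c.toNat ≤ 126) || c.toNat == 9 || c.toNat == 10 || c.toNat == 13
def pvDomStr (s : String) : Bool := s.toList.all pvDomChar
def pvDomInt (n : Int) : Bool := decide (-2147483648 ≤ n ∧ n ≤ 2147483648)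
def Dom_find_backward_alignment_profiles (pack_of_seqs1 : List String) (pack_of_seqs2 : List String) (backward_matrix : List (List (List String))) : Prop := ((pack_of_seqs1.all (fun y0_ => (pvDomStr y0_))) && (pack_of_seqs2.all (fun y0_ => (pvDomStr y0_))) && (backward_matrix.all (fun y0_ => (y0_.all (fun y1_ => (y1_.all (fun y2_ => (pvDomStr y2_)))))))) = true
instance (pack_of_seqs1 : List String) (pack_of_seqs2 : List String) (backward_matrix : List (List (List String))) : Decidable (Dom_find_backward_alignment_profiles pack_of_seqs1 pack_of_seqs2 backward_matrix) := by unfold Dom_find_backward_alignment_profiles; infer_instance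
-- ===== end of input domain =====

-- B fuses A's backtrace walk with the reconstruction: the single backward loop prepends the
-- matrix-indexed letter or '-' directly to every row, removing A's marker strings, counter and
-- both replay passes.  Objective: simpler (a different decomposition, same cost).

-- ===== PORT A =====
-- backward_matrix[i][j] (two chained Python indexings; none = IndexError)
def pvCell (bm : List (List (List String))) (i j : Int) : Option (List String) :=
  (PySem.List.pyGet? bm i).bind (fun row => PySem.List.pyGet? row j)

-- A's while-loop: builds first_string / second_string of 'L'/'G' markers (fuel-bounded; under
-- Pre_ the fuel n+m+1 is never exhausted; Python diverges or raises exactly where a branch stops)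
def pvWalkA (bm : List (List (List String))) : Nat → Int → Int → List Char → List Char → (List Char × List Char)
  | 0, _, _, fs, ss => (fs, ss)
  | fuel+1, i, j, fs, ss =>
    match pvCell bm i j with
    | none => (fs, ss)  -- Python: IndexError (outside Pre_)
    | some cell =>
      if 2 < cell.length then
        match PySem.List.pyGet? cell 2 with
        | some d =>
          if d == "top" then pvWalkA bm fuel (i-1) j (fs ++ ['L']) (ss ++ ['G'])
          else if d == "left" then pvWalkA bm fuel i (j-1) (fs ++ ['G']) (ss ++ ['L'])
          else if d == "diag" then pvWalkA bm fuel (i-1) (j-1) (fs ++ ['L']) (ss ++ ['L'])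
          else (fs, ss)  -- Python: NameError / infinite loop (outside Pre_)
        | none => (fs, ss)
      else (fs, ss)

-- one step of A's reconstruction loop: a 'G' column appends '-' to every row, otherwise every
-- row i gets pack[i][counter] (none = IndexError) and the counter advances
def pvStepA (pack : List String) (st : Option (List (List Char) × Int)) (c : Char) : Option (List (List Char) × Int) :=
  st.bind (fun rc =>
    if c = 'G' then some (rc.1.map (fun row => row ++ ['-']), rc.2)
    else (pack.mapM (fun s => PySem.Str.pyGet? s rc.2)).bind
           (fun chs => some (rc.1.zipWith (fun row ch => row ++ [ch]) chs, rc.2 + 1)))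

-- A's 'for j in range(len(marker)-1, -1, -1)' loop over one marker string
def pvReconA (pack : List String) (marker : List Char) : Option (List (List Char)) :=
  (marker.reverse.foldl (pvStepA pack) (some (pack.map (fun _ => ([] : List Char)), (0 : Int)))).map Prod.fst

def find_backward_alignment_profiles (pack_of_seqs1 : List String) (pack_of_seqs2 : List String) (backward_matrix : List (List (List String))) : List String :=
  match pack_of_seqs1.head?, pack_of_seqs2.head? with
  | some s1, some s2 =>
    let pr := pvWalkA backward_matrix (s1.toList.length + s2.toList.length + 1)
                (s1.toList.length : Int) (s2.toList.length : Int) [] []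
    match pvReconA pack_of_seqs1 pr.1, pvReconA pack_of_seqs2 pr.2 with
    | some r1, some r2 => r1.map String.ofList ++ r2.map String.ofList
    | _, _ => []      -- Python: IndexError in the reconstruction (outside Pre_)
  | _, _ => []        -- Python: IndexError on an empty pack (outside Pre_)

-- ===== PORT B =====
-- backward_matrix[i][j] for B's walk (B's own helper; none = IndexError)
def pvCellB (bm : List (List (List String))) (i j : Int) : Option (List String) :=
  (PySem.List.pyGet? bm i).bind (fun row => PySem.List.pyGet? row j)

-- B's '[s[idx] + r for s, r in zip(pack, rows)]' (none = IndexError on some s[idx])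
def pvPrependAt (pack : List String) (idx : Int) (rows : List (List Char)) : Option (List (List Char)) :=
  (pack.mapM (fun s => PySem.Str.pyGet? s idx)).map
    (fun chs => List.zipWith (fun ch r => ch :: r) chs rows)

-- B's single fused while-loop: walks the backtrace and prepends to every output row as it goes
def pvWalkFuse (p1 p2 : List String) (bm : List (List (List String))) :
    Nat → Int → Int → List (List Char) → List (List Char) → Option (List (List Char) × List (List Char))
  | 0, _, _, r1, r2 => some (r1, r2)   -- fuel exhausted: Python loops on (outside Pre_)
  | fuel+1, i, j, r1, r2 =>
    match pvCellB bm i j with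
    | none => none  -- Python: IndexError (outside Pre_)
    | some cell =>
      if 2 < cell.length then
        match PySem.List.pyGet? cell 2 with
        | some d =>
          if d == "top" then
            (pvPrependAt p1 (i-1) r1).bind (fun r1' =>
              pvWalkFuse p1 p2 bm fuel (i-1) j r1' (r2.map (fun r => '-' :: r)))
          else if d == "left" then
            (pvPrependAt p2 (j-1) r2).bind (fun r2' =>
              pvWalkFuse p1 p2 bm fuel i (j-1) (r1.map (fun r => '-' :: r)) r2')
          else if d == "diag" then
            (pvPrependAt p1 (i-1) r1).bind (fun r1' =>
              (pvPrependAt p2 (j-1) r2).bind (fun r2' =>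
                pvWalkFuse p1 p2 bm fuel (i-1) (j-1) r1' r2'))
          else some (r1, r2)  -- Python: infinite loop on an unknown direction (outside Pre_)
        | none => some (r1, r2)
      else some (r1, r2)

def find_backward_alignment_profiles_alt (pack_of_seqs1 : List String) (pack_of_seqs2 : List String) (backward_matrix : List (List (List String))) : List String :=
  match pack_of_seqs1, pack_of_seqs2 with
  | s1 :: _, s2 :: _ =>
    match pvWalkFuse pack_of_seqs1 pack_of_seqs2 backward_matrix
            (s1.toList.length + s2.toList.length + 1)
            (s1.toList.length : Int) (s2.toList.length : Int)
            (pack_of_seqs1.map (fun _ => [])) (pack_of_seqs2.map (fun _ => [])) with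
    | some rr => rr.1.map String.ofList ++ rr.2.map String.ofList
    | none => []   -- Python: IndexError (outside Pre_)
  | _, _ => []     -- Python: IndexError on an empty pack (outside Pre_)

-- ===== PRECONDITION & SPEC =====
-- a well-formed backtrace cell: a directed cell points inward, an undirected cell is the origin
def pvCellWF (i j : Nat) (c : List String) : Prop :=
  (2 < c.length →
    (c.getD 2 "" = "top" ∧ 0 < i) ∨ (c.getD 2 "" = "left" ∧ 0 < j) ∨
    (c.getD 2 "" = "diag" ∧ 0 < i ∧ 0 < j)) ∧
  (c.length ≤ 2 → i = 0 ∧ j = 0)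

-- the whole (n+1)×(m+1) grid is shaped and well-directed
def pvWF (bm : List (List (List String))) (n m : Nat) : Prop :=
  n < bm.length ∧ ∀ i < n + 1, m < (bm.getD i []).length ∧ ∀ j < m + 1, pvCellWF i j ((bm.getD i []).getD j [])

-- Pre_ excludes inputs on which A raises or diverges (empty pack, out-of-range start cell,
-- unknown direction, too-short sequences) and, when the start cell carries a direction, matrices
-- that are not well-formed backtrace tables (every non-origin cell directed inward, origin
-- undirected): on such malformed tables neither output is specified and each program's value is
-- an artefact of its traversal (A replays letters from position 0, B reads them at the matrix
-- indices) — see cites.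
def pvPreCore (n m : Nat) (pack_of_seqs1 : List String) (pack_of_seqs2 : List String) (backward_matrix : List (List (List String))) : Prop :=
  n < backward_matrix.length ∧ m < (backward_matrix.getD n []).length ∧
  (2 < (((backward_matrix.getD n []).getD m []).length) →
    (∀ s ∈ pack_of_seqs1, n ≤ s.toList.length) ∧
    (∀ s ∈ pack_of_seqs2, m ≤ s.toList.length) ∧
    pvWF backward_matrix n m)

def Pre_find_backward_alignment_profiles (pack_of_seqs1 : List String) (pack_of_seqs2 : List String) (backward_matrix : List (List (List String))) : Prop :=
  pack_of_seqs1 ≠ [] ∧ pack_of_seqs2 ≠ [] ∧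
  pvPreCore pack_of_seqs1.headI.toList.length pack_of_seqs2.headI.toList.length
    pack_of_seqs1 pack_of_seqs2 backward_matrix

instance (pack_of_seqs1 : List String) (pack_of_seqs2 : List String) (backward_matrix : List (List (List String))) : Decidable (Pre_find_backward_alignment_profiles pack_of_seqs1 pack_of_seqs2 backward_matrix) := by
  unfold Pre_find_backward_alignment_profiles pvPreCore
  letI I1 : ∀ (i j : Nat) (c : List String), Decidable (pvCellWF i j c) := fun i j c => by
    unfold pvCellWF; infer_instance
  letI : Decidable (pvWF backward_matrix pack_of_seqs1.headI.toList.length pack_of_seqs2.headI.toList.length) := by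
    unfold pvWF; infer_instance
  infer_instance

def pvWitness_find_backward_alignment_profiles : List String × List String × List (List (List String)) :=
  (["A"], ["C"], [[[], ["x", "y", "left"]], [["x", "y", "top"], ["x", "y", "diag"]]])

def Spec_find_backward_alignment_profiles (pack_of_seqs1 : List String) (pack_of_seqs2 : List String) (backward_matrix : List (List (List String))) (out : List String) : Prop := out = find_backward_alignment_profiles_alt pack_of_seqs1 pack_of_seqs2 backward_matrix
instance (pack_of_seqs1 : List String) (pack_of_seqs2 : List String) (backward_matrix : List (List (List String))) (out : List String) : Decidable (Spec_find_backward_alignment_profiles pack_of_seqs1 pack_of_seqs2 backward_matrix out) := by unfold Spec_find_backward_alignment_profiles; infer_instance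

-- ===== CLAIM (what is proved, stated in full; the proofs are below) =====
def Claim_equal_find_backward_alignment_profiles : Prop := ∀ (pack_of_seqs1 : List String) (pack_of_seqs2 : List String) (backward_matrix : List (List (List String))), Dom_find_backward_alignment_profiles pack_of_seqs1 pack_of_seqs2 backward_matrix → Pre_find_backward_alignment_profiles pack_of_seqs1 pack_of_seqs2 backward_matrix → Spec_find_backward_alignment_profiles pack_of_seqs1 pack_of_seqs2 backward_matrix (find_backward_alignment_profiles pack_of_seqs1 pack_of_seqs2 backward_matrix)

-- ===== LEMMAS AND PROOFS =====

-- the pure backtrace path both ports traverse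
def pvPath (bm : List (List (List String))) : Nat → Int → Int → List String
  | 0, _, _ => []
  | fuel+1, i, j =>
    match pvCell bm i j with
    | none => []
    | some cell =>
      if 2 < cell.length then
        match PySem.List.pyGet? cell 2 with
        | some d =>
          if d == "top" then d :: pvPath bm fuel (i-1) j
          else if d == "left" then d :: pvPath bm fuel i (j-1)
          else if d == "diag" then d :: pvPath bm fuel (i-1) (j-1)
          else []
        | none => []
      else []

-- A's marker letter for a move, relative to which side the gap direction is
def pvMark (gap d : String) : Char := if d == gap then 'G' else 'L'

-- the aligned row a sequence s yields along moves r starting at letter position c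
def pvBuild (gap : String) : List String → String → Int → List Char
  | [], _, _ => []
  | d :: r, s, c =>
    if d == gap then '-' :: pvBuild gap r s c
    else (PySem.Str.pyGet? s c).getD 'x' :: pvBuild gap r s (c+1)

lemma pvWalkA_eq_path (bm : List (List (List String))) :
    ∀ (fuel : Nat) (i j : Int) (fs ss : List Char),
      pvWalkA bm fuel i j fs ss =
        (fs ++ (pvPath bm fuel i j).map (pvMark "left"), ss ++ (pvPath bm fuel i j).map (pvMark "top")) := by
  intro fuel
  induction fuel with
  | zero => intro i j fs ss; simp [pvWalkA, pvPath]
  | succ fuel ih =>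
    intro i j fs ss
    rw [pvWalkA, pvPath]
    cases hc : pvCell bm i j with
    | none => simp
    | some cell =>
      by_cases hl : 2 < cell.length
      · simp only [hl, if_true]
        cases hd : PySem.List.pyGet? cell 2 with
        | none => simp
        | some d =>
          by_cases h1 : d == "top"
          · have hd1 : d = "top" := by simpa using h1
            subst hd1
            simp only [if_true, beq_self_eq_true, ih]
            simp [pvMark, List.append_assoc]
          · by_cases h2 : d == "left"
            · have hd2 : d = "left" := by simpa using h2
              subst hd2
              simp only [h1, Bool.false_eq_true, if_false, beq_self_eq_true, if_true, ih]
              simp [pvMark, List.append_assoc]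
            · by_cases h3 : d == "diag"
              · have hd3 : d = "diag" := by simpa using h3
                subst hd3
                simp only [h1, h2, Bool.false_eq_true, if_false, beq_self_eq_true, if_true, ih]
                simp [pvMark, List.append_assoc]
              · simp [h1, h2, h3]
      · simp [hl]

lemma pvCell_eq (bm : List (List (List String))) (i j : Int)
    (h0 : 0 ≤ i) (h1 : i.toNat < bm.length)
    (h0' : 0 ≤ j) (h2 : j.toNat < (bm.getD i.toNat []).length) :
    pvCell bm i j = some ((bm.getD i.toNat []).getD j.toNat []) := by
  have hrow : PySem.List.pyGet? bm i = some (bm.getD i.toNat []) := by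
    rw [PySem.List.pyGet?_of_nonneg bm h0, List.getElem?_eq_getElem h1, List.getD_eq_getElem _ _ h1]
  unfold pvCell
  rw [hrow]
  simp only [Option.bind_some]
  rw [PySem.List.pyGet?_of_nonneg _ h0', List.getElem?_eq_getElem h2, List.getD_eq_getElem _ _ h2]

-- under well-formedness the path from (i,j) consumes exactly i letters of pack1 and j of pack2
lemma pvPath_exact (bm : List (List (List String))) (n m : Nat) (hwf : pvWF bm n m) :
    ∀ (fuel : Nat) (i j : Int), 0 ≤ i → i ≤ (n : Int) → 0 ≤ j → j ≤ (m : Int) → i + j < (fuel : Int) →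
      (((pvPath bm fuel i j).countP (fun d => !(d == "left")) : Int) = i ∧
       ((pvPath bm fuel i j).countP (fun d => !(d == "top")) : Int) = j) := by
  intro fuel
  induction fuel with
  | zero => intro i j hi0 _ hj0 _ hf; exfalso; simp at hf; omega
  | succ fuel ih =>
    intro i j hi0 hin hj0 hjm hf
    have hilt : i.toNat < bm.length := by have := hwf.1; omega
    have hrow := (hwf.2 i.toNat (by omega)).1
    have hjlt : j.toNat < (bm.getD i.toNat []).length := by omega
    have hcwf := (hwf.2 i.toNat (by omega)).2 j.toNat (by omega)
    rw [pvPath, pvCell_eq bm i j hi0 hilt hj0 hjlt]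
    set cell := (bm.getD i.toNat []).getD j.toNat [] with hcell
    by_cases hl : 2 < cell.length
    · simp only [hl, if_true]
      have hget : PySem.List.pyGet? cell 2 = some (cell.getD 2 "") := by
        rw [PySem.List.pyGet?_eq_some_getElem cell (by omega) (by exact_mod_cast hl)]
        rw [List.getD_eq_getElem _ _ (by omega)]
        norm_num
        rfl
      rw [hget]
      rcases hcwf.1 hl with ⟨hd, hip⟩ | ⟨hd, hjp⟩ | ⟨hd, hip, hjp⟩
      · simp only [hd, if_true, beq_self_eq_true]
        have := ih (i - 1) j (by omega) (by omega) hj0 hjm (by omega)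
        simp only [List.countP_cons]
        simp only [show (("top" == "left") = false) from by decide,
                   show (("top" == "top") = true) from by decide]
        simp only [Bool.not_false, Bool.not_true, if_true]
        push_cast
        omega
      · simp only [hd]
        simp only [show (("left" == "top") = false) from by decide, Bool.false_eq_true, if_false,
                   beq_self_eq_true, if_true]
        have := ih i (j - 1) hi0 hin (by omega) (by omega) (by omega)
        simp only [List.countP_cons]
        simp only [show (("left" == "left") = true) from by decide,
                   show (("left" == "top") = false) from by decide]
        simp only [Bool.not_false, Bool.not_true, if_true]
        push_cast
        omega
      · simp only [hd]
        simp only [show (("diag" == "top") = false) from by decide,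
                   show (("diag" == "left") = false) from by decide, Bool.false_eq_true, if_false,
                   beq_self_eq_true, if_true]
        have := ih (i - 1) (j - 1) (by omega) (by omega) (by omega) (by omega) (by omega)
        simp only [List.countP_cons]
        simp only [show (("diag" == "left") = false) from by decide,
                   show (("diag" == "top") = false) from by decide]
        simp only [Bool.not_false, if_true]
        push_cast
        omega
    · have := hcwf.2 (by omega)
      simp only [hl, if_false]
      simp
      omega

lemma pvMapM_of_forall {α β : Type} (f : α → Option β) (g : α → β) :
    ∀ (l : List α), (∀ x ∈ l, f x = some (g x)) → l.mapM f = some (l.map g) := by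
  intro l
  induction l with
  | nil => intro _; simp
  | cons a t ih =>
    intro h
    rw [List.mapM_cons, h a (by simp), ih (fun x hx => h x (by simp [hx]))]
    simp

lemma pvStrGet_some (s : String) (c : Int) (h0 : 0 ≤ c) (hlt : c < (s.toList.length : Int)) :
    PySem.Str.pyGet? s c = some ((PySem.Str.pyGet? s c).getD 'x') := by
  have h : PySem.List.pyGet? s.toList c = some (s.toList[c.toNat]) :=
    PySem.List.pyGet?_eq_some_getElem s.toList h0 (by simpa using hlt)
  simp only [PySem.Str.pyGet?_eq, PySem.Chars.pyGet?_eq_listPyGet?]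
  rw [h]
  simp

lemma pvReconA_fold (gap : String) (pack : List String) :
    ∀ (r : List String) (g0 : String → List Char) (c : Int), 0 ≤ c →
      (∀ s ∈ pack, c + ((r.countP (fun d => !(d == gap)) : Nat) : Int) ≤ s.toList.length) →
      r.foldl (fun st d => pvStepA pack st (pvMark gap d)) (some (pack.map g0, c)) =
        some (pack.map (fun s => g0 s ++ pvBuild gap r s c),
              c + ((r.countP (fun d => !(d == gap)) : Nat) : Int)) := by
  intro r
  induction r with
  | nil => intro g0 c hc _; simp [pvBuild]
  | cons d r ih =>
    intro g0 c hc hlen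
    by_cases hd : d == gap
    · have hcnt : ((d :: r).countP (fun x => !(x == gap))) = r.countP (fun x => !(x == gap)) := by
        simp [hd]
      rw [List.foldl_cons]
      have hstep : pvStepA pack (some (pack.map g0, c)) (pvMark gap d) =
          some (pack.map (fun s => g0 s ++ ['-']), c) := by
        simp [pvStepA, pvMark, hd, List.map_map, Function.comp]
      rw [hstep]
      rw [ih (fun s => g0 s ++ ['-']) c hc (by simpa [hcnt] using hlen)]
      simp only [hcnt, Option.some.injEq, Prod.mk.injEq]
      refine ⟨?_, by trivial⟩
      apply List.map_congr_left
      intro s _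
      simp [pvBuild, hd, List.append_assoc]
    · have hcnt : ((d :: r).countP (fun x => !(x == gap))) = r.countP (fun x => !(x == gap)) + 1 := by
        simp [hd]
      rw [List.foldl_cons]
      have hget : ∀ s ∈ pack, PySem.Str.pyGet? s c = some ((PySem.Str.pyGet? s c).getD 'x') := by
        intro s hs
        refine pvStrGet_some s c hc ?_
        have := hlen s hs
        rw [hcnt] at this
        push_cast at this ⊢
        omega
      have hstep : pvStepA pack (some (pack.map g0, c)) (pvMark gap d) =
          some (pack.map (fun s => g0 s ++ [(PySem.Str.pyGet? s c).getD 'x']), c + 1) := by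
        simp only [pvStepA, pvMark, hd, Bool.false_eq_true, if_false, Option.bind_some]
        rw [if_neg (by decide : ¬ ('L' = 'G'))]
        rw [pvMapM_of_forall _ (fun s => (PySem.Str.pyGet? s c).getD 'x') pack hget]
        simp [List.zipWith_map_left, List.zipWith_map_right, List.zipWith_self]
      rw [hstep]
      rw [ih (fun s => g0 s ++ [(PySem.Str.pyGet? s c).getD 'x']) (c + 1) (by omega)
            (by intro s hs; have := hlen s hs; rw [hcnt] at this; push_cast at this ⊢; omega)]
      rw [hcnt]
      simp only [Option.some.injEq, Prod.mk.injEq]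
      constructor
      · apply List.map_congr_left
        intro s _
        simp [pvBuild, hd, List.append_assoc]
      · push_cast; omega

-- appending one move at the end of the move list appends one column to the built row
lemma pvBuild_snoc (gap d : String) (s : String) :
    ∀ (xs : List String) (c : Int),
      pvBuild gap (xs ++ [d]) s c =
        pvBuild gap xs s c ++
          [if d == gap then '-'
           else (PySem.Str.pyGet? s (c + ((xs.countP (fun x => !(x == gap)) : Nat) : Int))).getD 'x'] := by
  intro xs
  induction xs with
  | nil =>
    intro c
    by_cases hd : d == gap <;> simp [pvBuild, hd]
  | cons x xs ih =>
    intro c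
    by_cases hx : x == gap
    · simp only [List.cons_append, pvBuild, hx, if_true, ih, List.countP_cons]
      simp
    · simp only [List.cons_append, pvBuild, hx, Bool.false_eq_true, if_false, ih, List.countP_cons]
      simp only [Bool.not_false, if_true]
      have : c + 1 + ((xs.countP (fun x => !(x == gap)) : Nat) : Int) =
          c + (((xs.countP (fun x => !(x == gap)) + 1 : Nat)) : Int) := by push_cast; omega
      rw [this]

lemma pvZip_cons_map (f : String → Char) (g : String → List Char) :
    ∀ (l : List String) (rs : List (List Char)),
      List.zipWith (fun s r => g s ++ r) l (List.zipWith (fun ch r => ch :: r) (l.map f) rs)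
        = List.zipWith (fun s r => (g s ++ [f s]) ++ r) l rs := by
  intro l
  induction l with
  | nil => intro rs; simp
  | cons a l ih =>
    intro rs
    cases rs with
    | nil => simp
    | cons r rs => simp [ih, List.append_assoc]

lemma pvZip_dash_map (g : String → List Char) :
    ∀ (l : List String) (rs : List (List Char)),
      List.zipWith (fun s r => g s ++ r) l (rs.map (fun r => '-' :: r))
        = List.zipWith (fun s r => (g s ++ ['-']) ++ r) l rs := by
  intro l
  induction l with
  | nil => intro rs; simp
  | cons a l ih =>
    intro rs
    cases rs with
    | nil => simp
    | cons r rs => simp [ih, List.append_assoc]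

-- pointwise congruence for the row-building zipWith shape
lemma pvZip_ext (g1 g2 : String → List Char) :
    ∀ (l : List String) (rs : List (List Char)), (∀ s ∈ l, g1 s = g2 s) →
      List.zipWith (fun s r => g1 s ++ r) l rs = List.zipWith (fun s r => g2 s ++ r) l rs := by
  intro l
  induction l with
  | nil => intro rs _; simp
  | cons a l ih =>
    intro rs h
    cases rs with
    | nil => simp
    | cons r rs =>
      simp only [List.zipWith_cons_cons]
      rw [h a (by simp), ih rs (fun s hs => h s (by simp [hs]))]

lemma pvZip_snd {α : Type} (l : List α) :
    ∀ (rs : List (List Char)), rs.length ≤ l.length →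
      List.zipWith (fun _ r => r) l rs = rs := by
  induction l with
  | nil => intro rs h; simp at h; simp [h]
  | cons a l ih =>
    intro rs h
    cases rs with
    | nil => simp
    | cons r rs => simp at h ⊢; exact ih rs h

-- B's fused walk computes, for every row, the forward-built aligned column string
lemma pvWalkFuse_eq (p1 p2 : List String) (bm : List (List (List String))) (n m : Nat)
    (hwf : pvWF bm n m) :
    ∀ (fuel : Nat) (i j : Int), 0 ≤ i → i ≤ (n : Int) → 0 ≤ j → j ≤ (m : Int) → i + j < (fuel : Int) →
      (∀ s ∈ p1, i ≤ (s.toList.length : Int)) → (∀ s ∈ p2, j ≤ (s.toList.length : Int)) →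
      ∀ (r1 r2 : List (List Char)), r1.length = p1.length → r2.length = p2.length →
      pvWalkFuse p1 p2 bm fuel i j r1 r2 =
        some (List.zipWith (fun s r => pvBuild "left" (pvPath bm fuel i j).reverse s 0 ++ r) p1 r1,
              List.zipWith (fun s r => pvBuild "top" (pvPath bm fuel i j).reverse s 0 ++ r) p2 r2) := by
  intro fuel
  induction fuel with
  | zero => intro i j hi0 _ hj0 _ hf; exfalso; simp at hf; omega
  | succ fuel ih =>
    intro i j hi0 hin hj0 hjm hf hl1 hl2 r1 r2 hr1 hr2
    have hilt : i.toNat < bm.length := by have := hwf.1; omega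
    have hjlt : j.toNat < (bm.getD i.toNat []).length := by
      have := (hwf.2 i.toNat (by omega)).1; omega
    have hcwf := (hwf.2 i.toNat (by omega)).2 j.toNat (by omega)
    have hcellB : pvCellB bm i j = pvCell bm i j := rfl
    rw [pvWalkFuse, pvPath, hcellB, pvCell_eq bm i j hi0 hilt hj0 hjlt]
    set cell := (bm.getD i.toNat []).getD j.toNat [] with hcell
    by_cases hl : 2 < cell.length
    · simp only [hl, if_true]
      have hget : PySem.List.pyGet? cell 2 = some (cell.getD 2 "") := by
        rw [PySem.List.pyGet?_eq_some_getElem cell (by omega) (by exact_mod_cast hl)]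
        rw [List.getD_eq_getElem _ _ (by omega)]
        norm_num
        rfl
      rw [hget]
      -- prepending the letter at idx to every row of a pack, given letters exist
      have hpre : ∀ (pack : List String) (rows : List (List Char)) (idx : Int), 0 ≤ idx →
          (∀ s ∈ pack, idx < (s.toList.length : Int)) →
          pvPrependAt pack idx rows =
            some (List.zipWith (fun ch r => ch :: r)
              (pack.map (fun s => (PySem.Str.pyGet? s idx).getD 'x')) rows) := by
        intro pack rows idx h0 hlt
        unfold pvPrependAt
        rw [pvMapM_of_forall _ (fun s => (PySem.Str.pyGet? s idx).getD 'x') pack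
          (fun s hs => pvStrGet_some s idx h0 (hlt s hs))]
        simp
      rcases hcwf.1 hl with ⟨hd, hip⟩ | ⟨hd, hjp⟩ | ⟨hd, hip, hjp⟩
      all_goals simp only [hd]
      · -- top
        simp only [beq_self_eq_true, if_true]
        have hcnt := pvPath_exact bm n m hwf fuel (i - 1) j (by omega) (by omega) hj0 hjm
              (by push_cast at hf ⊢; omega)
        rw [hpre p1 r1 (i - 1) (by omega) (fun s hs => by have := hl1 s hs; omega),
            Option.bind_some,
            ih (i - 1) j (by omega) (by omega) hj0 hjm (by push_cast at hf ⊢; omega)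
              (fun s hs => by have := hl1 s hs; omega) hl2 _ _
              (by simp [hr1]) (by simp [hr2]),
            pvZip_cons_map (fun s => (PySem.Str.pyGet? s (i - 1)).getD 'x')
              (fun s => pvBuild "left" (pvPath bm fuel (i-1) j).reverse s 0) p1 r1,
            pvZip_dash_map (fun s => pvBuild "top" (pvPath bm fuel (i-1) j).reverse s 0) p2 r2]
        refine congrArg some (Prod.ext ?_ ?_)
        · refine pvZip_ext _ _ p1 r1 (fun s hs => ?_)
          rw [List.reverse_cons, pvBuild_snoc]
          simp only [show (("top" == "left") = false) from by decide, Bool.false_eq_true, if_false]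
          have hc : (0 : Int) + (((pvPath bm fuel (i-1) j).reverse.countP (fun x => !(x == "left")) : Nat) : Int) = i - 1 := by
            rw [List.countP_reverse]; have := hcnt.1; omega
          rw [hc]
        · refine pvZip_ext _ _ p2 r2 (fun s hs => ?_)
          rw [List.reverse_cons, pvBuild_snoc]
          simp
      · -- left
        simp only [show (("left" == "top") = false) from by decide, Bool.false_eq_true, if_false,
                   beq_self_eq_true, if_true]
        have hcnt := pvPath_exact bm n m hwf fuel i (j - 1) hi0 hin (by omega) (by omega)
              (by push_cast at hf ⊢; omega)
        rw [hpre p2 r2 (j - 1) (by omega) (fun s hs => by have := hl2 s hs; omega),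
            Option.bind_some,
            ih i (j - 1) hi0 hin (by omega) (by omega) (by push_cast at hf ⊢; omega)
              hl1 (fun s hs => by have := hl2 s hs; omega) _ _
              (by simp [hr1]) (by simp [hr2]),
            pvZip_cons_map (fun s => (PySem.Str.pyGet? s (j - 1)).getD 'x')
              (fun s => pvBuild "top" (pvPath bm fuel i (j-1)).reverse s 0) p2 r2,
            pvZip_dash_map (fun s => pvBuild "left" (pvPath bm fuel i (j-1)).reverse s 0) p1 r1]
        refine congrArg some (Prod.ext ?_ ?_)
        · refine pvZip_ext _ _ p1 r1 (fun s hs => ?_)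
          rw [List.reverse_cons, pvBuild_snoc]
          simp
        · refine pvZip_ext _ _ p2 r2 (fun s hs => ?_)
          rw [List.reverse_cons, pvBuild_snoc]
          simp only [show (("left" == "top") = false) from by decide, Bool.false_eq_true, if_false]
          have hc : (0 : Int) + (((pvPath bm fuel i (j-1)).reverse.countP (fun x => !(x == "top")) : Nat) : Int) = j - 1 := by
            rw [List.countP_reverse]; have := hcnt.2; omega
          rw [hc]
      · -- diag
        simp only [show (("diag" == "top") = false) from by decide,
                   show (("diag" == "left") = false) from by decide, Bool.false_eq_true, if_false,
                   beq_self_eq_true, if_true]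
        have hcnt := pvPath_exact bm n m hwf fuel (i - 1) (j - 1) (by omega) (by omega)
              (by omega) (by omega) (by push_cast at hf ⊢; omega)
        rw [hpre p1 r1 (i - 1) (by omega) (fun s hs => by have := hl1 s hs; omega),
            Option.bind_some,
            hpre p2 r2 (j - 1) (by omega) (fun s hs => by have := hl2 s hs; omega),
            Option.bind_some,
            ih (i - 1) (j - 1) (by omega) (by omega) (by omega) (by omega)
              (by push_cast at hf ⊢; omega)
              (fun s hs => by have := hl1 s hs; omega)
              (fun s hs => by have := hl2 s hs; omega) _ _
              (by simp [hr1]) (by simp [hr2]),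
            pvZip_cons_map (fun s => (PySem.Str.pyGet? s (i - 1)).getD 'x')
              (fun s => pvBuild "left" (pvPath bm fuel (i-1) (j-1)).reverse s 0) p1 r1,
            pvZip_cons_map (fun s => (PySem.Str.pyGet? s (j - 1)).getD 'x')
              (fun s => pvBuild "top" (pvPath bm fuel (i-1) (j-1)).reverse s 0) p2 r2]
        refine congrArg some (Prod.ext ?_ ?_)
        · refine pvZip_ext _ _ p1 r1 (fun s hs => ?_)
          rw [List.reverse_cons, pvBuild_snoc]
          simp only [show (("diag" == "left") = false) from by decide, Bool.false_eq_true, if_false]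
          have hc : (0 : Int) + (((pvPath bm fuel (i-1) (j-1)).reverse.countP (fun x => !(x == "left")) : Nat) : Int) = i - 1 := by
            rw [List.countP_reverse]; have := hcnt.1; omega
          rw [hc]
        · refine pvZip_ext _ _ p2 r2 (fun s hs => ?_)
          rw [List.reverse_cons, pvBuild_snoc]
          simp only [show (("diag" == "top") = false) from by decide, Bool.false_eq_true, if_false]
          have hc : (0 : Int) + (((pvPath bm fuel (i-1) (j-1)).reverse.countP (fun x => !(x == "top")) : Nat) : Int) = j - 1 := by
            rw [List.countP_reverse]; have := hcnt.2; omega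
          rw [hc]
    · have h0 := hcwf.2 (by omega)
      simp only [hl, if_false]
      simp [pvBuild]
      exact ⟨(pvZip_snd _ _ (le_of_eq hr1)).symm, (pvZip_snd _ _ (le_of_eq hr2)).symm⟩

lemma pvZip_empty (f : String → List Char) :
    ∀ (l : List String),
      List.zipWith (fun x y => String.ofList (f x) ++ String.ofList y) l
          (List.replicate l.length ([] : List Char)) = l.map (fun s => String.ofList (f s)) := by
  intro l
  induction l with
  | nil => simp
  | cons a l ih =>
    rw [List.length_cons, List.replicate_succ, List.zipWith_cons_cons, ih, List.map_cons]
    simp [show String.ofList ([] : List Char) = "" from rfl]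

-- ===== VERDICT (by name: the statement is the Claim_ definition above) =====
theorem find_backward_alignment_profiles_spec : Claim_equal_find_backward_alignment_profiles := by
  unfold Claim_equal_find_backward_alignment_profiles
  intro p1 p2 bm _hdom hpre
  unfold Spec_find_backward_alignment_profiles
  obtain ⟨hp1, hp2, hpre'⟩ := hpre
  rcases p1 with _ | ⟨a, t1⟩
  · exact absurd rfl hp1
  rcases p2 with _ | ⟨b, t2⟩
  · exact absurd rfl hp2
  simp only [List.headI] at hpre'
  set n := a.toList.length with hn
  set m := b.toList.length with hm
  obtain ⟨hnlt, hmlt, hcond⟩ := hpre'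
  set q := pvPath bm (n + m + 1) (n : Int) (m : Int) with hq
  -- A's reconstructions along the common path
  have hreconA : ∀ (gap : String) (pack : List String),
      (∀ s ∈ pack, ((q.countP (fun d => !(d == gap)) : Nat) : Int) ≤ s.toList.length) →
      pvReconA pack (q.map (pvMark gap)) = some (pack.map (fun s => pvBuild gap q.reverse s 0)) := by
    intro gap pack hl
    unfold pvReconA
    rw [← List.map_reverse, List.foldl_map]
    have := pvReconA_fold gap pack q.reverse (fun _ => []) 0 (by omega)
      (by intro s hs; rw [List.countP_reverse]; simpa using hl s hs)
    rw [this]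
    simp
  by_cases hstart : 2 < (((bm.getD n []).getD m []).length)
  · -- directed start cell: the grid is a well-formed backtrace table
    obtain ⟨hlen1, hlen2, hwf⟩ := hcond hstart
    have hcnt := pvPath_exact bm n m hwf (n + m + 1) (n : Int) (m : Int)
      (by omega) le_rfl (by omega) le_rfl (by push_cast; omega)
    rw [← hq] at hcnt
    have hb1 : ∀ s ∈ a :: t1, ((q.countP (fun d => !(d == "left")) : Nat) : Int) ≤ s.toList.length := by
      intro s hs; have := hlen1 s hs; omega
    have hb2 : ∀ s ∈ b :: t2, ((q.countP (fun d => !(d == "top")) : Nat) : Int) ≤ s.toList.length := by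
      intro s hs; have := hlen2 s hs; omega
    rw [find_backward_alignment_profiles, find_backward_alignment_profiles_alt]
    simp only [List.head?_cons]
    rw [pvWalkA_eq_path]
    simp only [List.nil_append, ← hq, ← hn, ← hm]
    rw [hreconA "left" (a :: t1) hb1, hreconA "top" (b :: t2) hb2]
    rw [pvWalkFuse_eq (a :: t1) (b :: t2) bm n m hwf (n + m + 1) (n : Int) (m : Int)
      (by omega) le_rfl (by omega) le_rfl (by push_cast; omega)
      (fun s hs => by have := hlen1 s hs; omega)
      (fun s hs => by have := hlen2 s hs; omega)
      ((a :: t1).map (fun _ => [])) ((b :: t2).map (fun _ => []))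
      (by simp) (by simp)]
    simp only [← hq]
    simp
    rw [pvZip_empty (fun s => pvBuild "left" q.reverse s 0) t1,
        pvZip_empty (fun s => pvBuild "top" q.reverse s 0) t2]
    rfl
  · -- undirected start cell: the path is empty, both sides return rows of empty strings
    have hq0 : q = [] := by
      rw [hq, show n + m + 1 = (n + m) + 1 from rfl, pvPath,
        pvCell_eq bm n m (by omega) (by simpa using hnlt) (by omega) (by simpa using hmlt)]
      simp only [Int.toNat_natCast]
      rw [if_neg hstart]
    rw [find_backward_alignment_profiles, find_backward_alignment_profiles_alt]
    simp only [List.head?_cons]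
    rw [pvWalkA_eq_path]
    simp only [List.nil_append, ← hq, ← hn, ← hm]
    rw [hreconA "left" (a :: t1) (by simp [hq0]), hreconA "top" (b :: t2) (by simp [hq0])]
    rw [show ((n + m + 1 : Nat)) = (n + m) + 1 from rfl, pvWalkFuse,
      show pvCellB bm (n : Int) (m : Int) = pvCell bm (n : Int) (m : Int) from rfl,
      pvCell_eq bm n m (by omega) (by simpa using hnlt) (by omega) (by simpa using hmlt)]
    simp only [Int.toNat_natCast]
    rw [if_neg hstart]
    simp [hq0, pvBuild]
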